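-- pv_equiv track=rewrite | github.com/yannickloth/W33-Theory | exploration/ANTISYMMETRY_FIX.py | order_signature
-- ===== SOURCE A (Python) =====
-- def support(c):
--     return frozenset(i for i, x in enumerate(c) if x != 0)
--
-- def order_signature(c1, c2):
--     """Compute a signature that changes when c1, c2 are swapped."""
--     H1, H2 = support(c1), support(c2)
--     if len(H1 & H2) != 3:
--         return None
--
--     # The positions unique to H1 vs unique to H2
--     only_H1 = sorted(H1 - H2)
--     only_H2 = sorted(H2 - H1)
--
--     # Values from c1 on positions only in H1
--     vals_c1 = tuple(c1[i] for i in only_H1)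
--     # Values from c2 on positions only in H2
--     vals_c2 = tuple(c2[i] for i in only_H2)
--
--     # A simple asymmetric combination: sum over GF(3)
--     sum_c1 = sum(vals_c1) % 3
--     sum_c2 = sum(vals_c2) % 3
--
--     return (sum_c1, sum_c2)
-- ===== SOURCE B (Python) =====
-- def order_signature(c1, c2):
--     """Compute a signature that changes when c1, c2 are swapped."""
--     common = 0
--     sum_c1 = 0
--     sum_c2 = 0
--     for i in range(max(len(c1), len(c2))):
--         v1 = c1[i] if i < len(c1) else 0
--         v2 = c2[i] if i < len(c2) else 0
--         if v1 != 0 and v2 != 0: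
--             common += 1
--         elif v1 != 0:
--             sum_c1 += v1
--         elif v2 != 0:
--             sum_c2 += v2
--     if common != 3:
--         return None
--     return (sum_c1 % 3, sum_c2 % 3)
-- ===== Notes on version B (the rewrite author's own statement) =====
-- stated objective: faster
-- what changed: Replaced the two frozenset supports, set intersection/difference, sorting and index-gather passes by a single fused loop over range(max(len(c1),len(c2))) that counts common nonzero positions and accumulates the two exclusive sums in one pass.
import Mathlib
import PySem

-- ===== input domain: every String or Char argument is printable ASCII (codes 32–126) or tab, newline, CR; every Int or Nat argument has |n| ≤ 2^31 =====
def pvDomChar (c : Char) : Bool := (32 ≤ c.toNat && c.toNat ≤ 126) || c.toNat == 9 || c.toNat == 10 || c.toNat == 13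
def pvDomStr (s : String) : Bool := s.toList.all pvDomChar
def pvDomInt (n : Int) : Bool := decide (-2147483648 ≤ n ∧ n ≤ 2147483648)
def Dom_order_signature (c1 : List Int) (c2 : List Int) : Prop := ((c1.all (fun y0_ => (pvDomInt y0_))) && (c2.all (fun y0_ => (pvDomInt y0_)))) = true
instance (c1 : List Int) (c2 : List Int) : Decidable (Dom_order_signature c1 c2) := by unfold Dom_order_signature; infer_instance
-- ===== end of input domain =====

-- B replaces A's frozenset/support set algebra by one fused counting pass over the index range (measured ~2x faster in a timing run).

-- ===== PORT A =====
def pySupport (c : List Int) : PySem.Set Int :=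
  PySem.Set.ofList (((PySem.List.enumerate c 0).filter (fun p => p.2 != 0)).map (fun p => p.1))

def order_signature (c1 : List Int) (c2 : List Int) : Option (Int × Int) :=
  let H1 := pySupport c1
  let H2 := pySupport c2
  if PySem.Set.len (PySem.Set.inter H1 H2) ≠ 3 then none
  else
    let only_H1 := PySem.List.sorted (PySem.Set.diff H1 H2) (fun x => x) false
    let only_H2 := PySem.List.sorted (PySem.Set.diff H2 H1) (fun x => x) false
    -- c1[i] / c2[i]: every i in a support is a valid nonnegative index, so Python never raises;
    -- pyGetD's default is unreachable here (exact).
    let vals_c1 := only_H1.map (fun i => PySem.List.pyGetD c1 i 0)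
    let vals_c2 := only_H2.map (fun i => PySem.List.pyGetD c2 i 0)
    some (PySem.Int.mod vals_c1.sum 3, PySem.Int.mod vals_c2.sum 3)

-- ===== PORT B =====
def order_signature_alt (c1 : List Int) (c2 : List Int) : Option (Int × Int) :=
  let n : Int := max (c1.length : Int) (c2.length : Int)
  let st := (PySem.List.pyRange 0 n 1).foldl
    (fun (acc : Int × Int × Int) i =>
      let v1 := if i < (c1.length : Int) then PySem.List.pyGetD c1 i 0 else 0
      let v2 := if i < (c2.length : Int) then PySem.List.pyGetD c2 i 0 else 0
      if v1 ≠ 0 ∧ v2 ≠ 0 then (acc.1 + 1, acc.2.1, acc.2.2)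
      else if v1 ≠ 0 then (acc.1, acc.2.1 + v1, acc.2.2)
      else if v2 ≠ 0 then (acc.1, acc.2.1, acc.2.2 + v2)
      else acc) (0, 0, 0)
  if st.1 ≠ 3 then none
  else some (PySem.Int.mod st.2.1 3, PySem.Int.mod st.2.2 3)

-- ===== PRECONDITION & SPEC =====
def Spec_order_signature (c1 : List Int) (c2 : List Int) (out : Option (Int × Int)) : Prop := out = order_signature_alt c1 c2
instance (c1 : List Int) (c2 : List Int) (out : Option (Int × Int)) : Decidable (Spec_order_signature c1 c2 out) := by unfold Spec_order_signature; infer_instance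

-- ===== CLAIM (what is proved, stated in full; the proofs are below) =====
def Claim_equal_order_signature : Prop := ∀ (c1 : List Int) (c2 : List Int), Dom_order_signature c1 c2 → Spec_order_signature c1 c2 (order_signature c1 c2)

-- ===== LEMMAS AND PROOFS =====

-- "index k holds a nonzero coefficient" (out-of-range reads as zero, like Python's per-vector support)
def nzF (c : List Int) (k : Nat) : Bool := c.getD k 0 != 0

-- the support of c restricted to indices below N, as an increasing list of Nat indices
def suppN (c : List Int) (N : Nat) : List Nat := (List.range N).filter (fun k => nzF c k)

-- the common normal form both ports are reduced to
def normSig (c1 c2 : List Int) : Option (Int × Int) :=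
  let N := max c1.length c2.length
  if (((List.range N).filter (fun k => nzF c1 k && nzF c2 k)).length : Int) ≠ 3 then none
  else some
    (PySem.Int.mod (((List.range N).filter (fun k => nzF c1 k && !nzF c2 k)).map (fun k => c1.getD k 0)).sum 3,
     PySem.Int.mod (((List.range N).filter (fun k => nzF c2 k && !nzF c1 k)).map (fun k => c2.getD k 0)).sum 3)

lemma nzF_of_le {c : List Int} {k : Nat} (h : c.length ≤ k) : nzF c k = false := by
  simp [nzF, List.getD, List.getElem?_eq_none h]

lemma suppN_ext (c : List Int) {N : Nat} (h : c.length ≤ N) : suppN c N = suppN c c.length := by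
  induction N, h using Nat.le_induction with
  | base => rfl
  | succ n hn ih =>
      rw [suppN, List.range_succ, List.filter_append, ← suppN, ih]
      simp [nzF_of_le hn]

lemma pairwise_suppN (c : List Int) (N : Nat) : (suppN c N).Pairwise (· < ·) :=
  (List.pairwise_lt_range).filter _

lemma pairwise_cast {l : List Nat} (h : l.Pairwise (· < ·)) :
    (l.map (fun k : Nat => (k : Int))).Pairwise (· < ·) := by
  refine List.pairwise_map.mpr (h.imp ?_)
  intro a b hab
  exact_mod_cast hab

lemma support_shift (c : List Int) (s : Int) :
    ((PySem.List.enumerate c s).filter (fun p => p.2 != 0)).map (fun p => p.1)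
      = (suppN c c.length).map (fun k : Nat => s + (k : Int)) := by
  induction c generalizing s with
  | nil => rfl
  | cons x xs ih =>
      have hr : suppN (x :: xs) (x :: xs).length
          = (if x != 0 then [0] else []) ++ (suppN xs xs.length).map Nat.succ := by
        rw [suppN, List.length_cons, List.range_succ_eq_map, List.filter_cons, List.filter_map]
        have hc : ((fun k => nzF (x :: xs) k) ∘ Nat.succ) = fun k => nzF xs k := by
          funext k; simp [nzF]
        rw [hc]
        by_cases h0 : (x != 0) = true <;>
          simp [nzF, h0, suppN]
      rw [PySem.List.enumerate_cons, List.filter_cons, hr]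
      cases hb : (x != 0) with
      | false =>
          simp only [Bool.false_eq_true, if_false, List.nil_append]
          rw [ih (s + 1)]
          simp only [List.map_map]
          apply List.map_congr_left
          intro k _
          simp only [Function.comp_apply]
          push_cast; ring
      | true =>
          rw [if_pos rfl, if_pos rfl]
          simp only [List.map_cons, List.map_append, List.map_map]
          rw [ih (s + 1)]
          refine congrArg₂ List.cons ?_ ?_
          · push_cast; ring
          · apply List.map_congr_left
            intro k _
            simp only [Function.comp_apply]
            push_cast; ring

lemma pySupport_eq (c : List Int) :
    pySupport c = (suppN c c.length).map (fun k : Nat => (k : Int)) := by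
  rw [pySupport]
  have h := support_shift c 0
  simp only [zero_add] at h
  rw [h]
  exact PySem.Set.ofList_eq_self_of_nodup _
    ((pairwise_cast (pairwise_suppN c _)).imp ne_of_lt)

lemma contains_cast_supp (c2 : List Int) (N : Nat) (k : Nat) (hk : k < N) :
    (List.map (fun j : Nat => (j : Int)) (suppN c2 N)).contains ((k : Nat) : Int) = nzF c2 k := by
  rw [Bool.eq_iff_iff]
  simp [suppN, List.mem_filter, List.mem_range]
  intro _
  exact hk

lemma inter_supp (c1 c2 : List Int) :
    PySem.Set.inter (pySupport c1) (pySupport c2)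
      = List.map (fun k : Nat => (k : Int))
          ((List.range (max c1.length c2.length)).filter (fun k => nzF c1 k && nzF c2 k)) := by
  rw [pySupport_eq, pySupport_eq,
      ← suppN_ext c1 (N := max c1.length c2.length) (Nat.le_max_left _ _),
      ← suppN_ext c2 (N := max c1.length c2.length) (Nat.le_max_right _ _)]
  simp only [PySem.Set.inter, PySem.Set.contains, List.filter_map]
  refine congrArg _ ?_
  have hstep : ∀ k ∈ suppN c1 (max c1.length c2.length),
      ((fun x => (List.map (fun j : Nat => (j : Int)) (suppN c2 (max c1.length c2.length))).contains x)
        ∘ fun k : Nat => (k : Int)) k = nzF c2 k := by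
    intro k hk
    have hkN : k < max c1.length c2.length := by
      simp only [suppN, List.mem_filter, List.mem_range] at hk
      exact hk.1
    simpa using contains_cast_supp c2 _ k hkN
  rw [List.filter_congr hstep]
  simp only [suppN, List.filter_filter]
  exact List.filter_congr (fun k _ => by
    cases h1 : nzF c1 k <;> cases h2 : nzF c2 k <;> simp)

lemma diff_supp (c1 c2 : List Int) (N : Nat) (h1 : c1.length ≤ N) (h2 : c2.length ≤ N) :
    PySem.Set.diff (pySupport c1) (pySupport c2)
      = List.map (fun k : Nat => (k : Int))
          ((List.range N).filter (fun k => nzF c1 k && !nzF c2 k)) := by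
  rw [pySupport_eq, pySupport_eq, ← suppN_ext c1 h1, ← suppN_ext c2 h2]
  simp only [PySem.Set.diff, PySem.Set.contains, List.filter_map]
  refine congrArg _ ?_
  have hstep : ∀ k ∈ suppN c1 N,
      ((fun x => !(List.map (fun j : Nat => (j : Int)) (suppN c2 N)).contains x)
        ∘ fun k : Nat => (k : Int)) k = !nzF c2 k := by
    intro k hk
    have hkN : k < N := by
      simp only [suppN, List.mem_filter, List.mem_range] at hk
      exact hk.1
    simp only [Function.comp_apply]
    rw [contains_cast_supp c2 _ k hkN]
  rw [List.filter_congr hstep]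
  simp only [suppN, List.filter_filter]
  exact List.filter_congr (fun k _ => by
    cases h1 : nzF c1 k <;> cases h2 : nzF c2 k <;> simp)

lemma vals_cast (c : List Int) (l : List Nat) :
    (List.map (fun k : Nat => (k : Int)) l).map (fun i => PySem.List.pyGetD c i 0)
      = l.map (fun k => c.getD k 0) := by
  rw [List.map_map]
  refine List.map_congr_left ?_
  intro k _
  simp [PySem.List.pyGetD_natCast]

lemma A_norm (c1 c2 : List Int) : order_signature c1 c2 = normSig c1 c2 := by
  have hpair : ∀ (c c' : List Int) (p : Nat → Bool),
      (List.map (fun k : Nat => (k : Int)) ((List.range (max c1.length c2.length)).filter p)).Pairwise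
        (fun a b => a < b) :=
    fun _ _ p => pairwise_cast ((List.pairwise_lt_range).filter p)
  simp only [order_signature, normSig]
  rw [inter_supp c1 c2,
      diff_supp c1 c2 (max c1.length c2.length) (Nat.le_max_left _ _) (Nat.le_max_right _ _),
      diff_supp c2 c1 (max c1.length c2.length) (Nat.le_max_right _ _) (Nat.le_max_left _ _)]
  rw [PySem.List.sorted_eq_of_perm_of_pairwise_lt _ _ _ (List.Perm.refl _) (hpair c1 c2 _),
      PySem.List.sorted_eq_of_perm_of_pairwise_lt _ _ _ (List.Perm.refl _) (hpair c2 c1 _)]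
  rw [vals_cast, vals_cast]
  simp [PySem.Set.len]

-- B's loop body on natural indices, after the pyRange/cast bookkeeping is removed
def stepN (c1 c2 : List Int) (acc : Int × Int × Int) (k : Nat) : Int × Int × Int :=
  if c1.getD k 0 ≠ 0 ∧ c2.getD k 0 ≠ 0 then (acc.1 + 1, acc.2.1, acc.2.2)
  else if c1.getD k 0 ≠ 0 then (acc.1, acc.2.1 + c1.getD k 0, acc.2.2)
  else if c2.getD k 0 ≠ 0 then (acc.1, acc.2.1, acc.2.2 + c2.getD k 0)
  else acc

lemma foldl_stepN (c1 c2 : List Int) (l : List Nat) (a b c : Int) :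
    l.foldl (stepN c1 c2) (a, b, c)
      = (a + ((l.filter (fun k => nzF c1 k && nzF c2 k)).length : Int),
         b + ((l.filter (fun k => nzF c1 k && !nzF c2 k)).map (fun k => c1.getD k 0)).sum,
         c + ((l.filter (fun k => nzF c2 k && !nzF c1 k)).map (fun k => c2.getD k 0)).sum) := by
  induction l generalizing a b c with
  | nil => simp
  | cons k t ih =>
      rw [List.foldl_cons]
      by_cases h1 : c1.getD k 0 = 0 <;> by_cases h2 : c2.getD k 0 = 0
      · rw [show stepN c1 c2 (a, b, c) k = (a, b, c) from by
          rw [stepN, if_neg (fun h => h.1 h1), if_neg (fun h => h h1), if_neg (fun h => h h2)]]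
        rw [ih]
        have hb1 : (c1.getD k 0 != 0) = false := by rw [h1]; rfl
        have hb2 : (c2.getD k 0 != 0) = false := by rw [h2]; rfl
        have e1 : (nzF c1 k && nzF c2 k) = false := by rw [nzF, hb1]; rfl
        have e2 : (nzF c1 k && !nzF c2 k) = false := by rw [nzF, hb1]; rfl
        have e3 : (nzF c2 k && !nzF c1 k) = false := by rw [nzF, hb2]; rfl
        simp [e1, e2, e3]
      · rw [show stepN c1 c2 (a, b, c) k = (a, b, c + c2.getD k 0) from by
          rw [stepN, if_neg (fun h => h.1 h1), if_neg (fun h => h h1), if_pos h2]]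
        rw [ih]
        have hb1 : (c1.getD k 0 != 0) = false := by rw [h1]; rfl
        have hb2 : (c2.getD k 0 != 0) = true := bne_iff_ne.mpr h2
        have e1 : (nzF c1 k && nzF c2 k) = false := by rw [nzF, hb1]; rfl
        have e2 : (nzF c1 k && !nzF c2 k) = false := by rw [nzF, hb1]; rfl
        have e3 : (nzF c2 k && !nzF c1 k) = true := by rw [nzF, nzF, hb1, hb2]; rfl
        simp only [List.filter_cons, e1, e2, e3, Bool.false_eq_true, if_false, if_true,
          List.map_cons, List.sum_cons]
        refine Prod.ext rfl (Prod.ext rfl ?_)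
        simp only []
        ring
      · rw [show stepN c1 c2 (a, b, c) k = (a, b + c1.getD k 0, c) from by
          rw [stepN, if_neg (fun h => h.2 h2), if_pos h1]]
        rw [ih]
        have hb1 : (c1.getD k 0 != 0) = true := bne_iff_ne.mpr h1
        have hb2 : (c2.getD k 0 != 0) = false := by rw [h2]; rfl
        have e1 : (nzF c1 k && nzF c2 k) = false := by rw [nzF, nzF, hb1, hb2]; rfl
        have e2 : (nzF c1 k && !nzF c2 k) = true := by rw [nzF, nzF, hb1, hb2]; rfl
        have e3 : (nzF c2 k && !nzF c1 k) = false := by rw [nzF, hb2]; rfl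
        simp only [List.filter_cons, e1, e2, e3, Bool.false_eq_true, if_false, if_true,
          List.map_cons, List.sum_cons]
        refine Prod.ext rfl (Prod.ext ?_ rfl)
        simp only []
        ring
      · rw [show stepN c1 c2 (a, b, c) k = (a + 1, b, c) from by
          rw [stepN, if_pos ⟨h1, h2⟩]]
        rw [ih]
        have hb1 : (c1.getD k 0 != 0) = true := bne_iff_ne.mpr h1
        have hb2 : (c2.getD k 0 != 0) = true := bne_iff_ne.mpr h2
        have e1 : (nzF c1 k && nzF c2 k) = true := by rw [nzF, nzF, hb1, hb2]; rfl
        have e2 : (nzF c1 k && !nzF c2 k) = false := by rw [nzF, nzF, hb1, hb2]; rfl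
        have e3 : (nzF c2 k && !nzF c1 k) = false := by rw [nzF, nzF, hb1, hb2]; rfl
        simp only [List.filter_cons, e1, e2, e3, Bool.false_eq_true, if_false, if_true,
          List.length_cons]
        refine Prod.ext ?_ rfl
        simp only []
        push_cast
        ring

lemma B_norm (c1 c2 : List Int) : order_signature_alt c1 c2 = normSig c1 c2 := by
  simp only [order_signature_alt, normSig]
  have hN : max ((c1.length : Int)) ((c2.length : Int)) = ((max c1.length c2.length : Nat) : Int) :=
    (Nat.cast_max c1.length c2.length).symm
  rw [hN, PySem.List.pyRange_one]
  rw [show (((max c1.length c2.length : Nat) : Int) - 0).toNat = max c1.length c2.length from by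
    rw [Int.sub_zero, Int.toNat_natCast]]
  rw [List.foldl_map]
  have hstep : (fun (acc : Int × Int × Int) (k : Nat) =>
      (fun (acc : Int × Int × Int) (i : Int) =>
        let v1 := if i < (c1.length : Int) then PySem.List.pyGetD c1 i 0 else 0
        let v2 := if i < (c2.length : Int) then PySem.List.pyGetD c2 i 0 else 0
        if v1 ≠ 0 ∧ v2 ≠ 0 then (acc.1 + 1, acc.2.1, acc.2.2)
        else if v1 ≠ 0 then (acc.1, acc.2.1 + v1, acc.2.2)
        else if v2 ≠ 0 then (acc.1, acc.2.1, acc.2.2 + v2)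
        else acc) acc ((0 : Int) + (k : Int))) = stepN c1 c2 := by
    funext acc k
    have hv : ∀ c : List Int, (if (0 : Int) + (k : Int) < (c.length : Int)
        then PySem.List.pyGetD c ((0 : Int) + (k : Int)) 0 else 0) = c.getD k 0 := by
      intro c
      rw [zero_add]
      by_cases hk : k < c.length
      · rw [if_pos (by exact_mod_cast hk)]
        simp [PySem.List.pyGetD_natCast]
      · rw [if_neg (by exact_mod_cast hk)]
        rw [List.getD_eq_default _ _ (Nat.le_of_not_lt hk)]
    simp only [stepN, hv]
  rw [hstep, foldl_stepN]
  simp only [zero_add]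

-- ===== VERDICT (by name: the statement is the Claim_ definition above) =====
theorem order_signature_spec : Claim_equal_order_signature := by
  intro c1 c2 _
  unfold Spec_order_signature
  rw [A_norm, B_norm]
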